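-- pv_equiv track=rewrite | github.com/Issacyau/COM6911-Team-November | alg_new.py | make_SI
-- ===== SOURCE A (Python) =====
-- def make_SI(raw_sig):
--
--     # According to the number of the types of sensor data
--     # Generate a list of all possible pairs of each two sensor data
--     type_sensor = len(raw_sig)
--     pair_list = []
--
--     for i in range (1,type_sensor):
--         temp_list = []
--         temp_list = [temp_list+[i,j+1] for j in range(i,type_sensor)]
--         pair_list += temp_list
--
--     # After getting all possible pairs
--     # Complete the sig_list that ensure each two sensor datas are adjacent at least once
--
--     # The idea is to initial the sig_list as [1,2],
--     # Then combine other possible pairs at both ends of the sig_list according to the same number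
--     # The priority of the combination is from long list(e.g., [1,x]) to short list(e.g., [5,x]) in pair_list
--
--     # Initial the sig_list to store the arrange of each input signal vectors
--     sig_list = pair_list[0]
--     del pair_list[0]
--
--     # Run the process until no element in pair_list
--     while pair_list:
--
--         for pair in pair_list:
--
--             if sig_list[0] == pair[0]:
--                 sig_list.insert(0,pair[1])
--                 pair_list.remove(pair)
--                 break
--
--
--             elif sig_list[0] == pair[1]:
--                 sig_list.insert(0,pair[0])
--                 pair_list.remove(pair)
--                 break
--
--
--             elif sig_list[-1] == pair[0]:
--                 sig_list.append(pair[1])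
--                 pair_list.remove(pair)
--                 break
--
--
--             elif sig_list[-1] == pair[1]:
--                 sig_list.append(pair[0])
--                 pair_list.remove(pair)
--                 break
--
--
--             elif pair == pair_list[-1]:
--                 sig_list.append(pair[0])
--                 sig_list.append(pair[1])
--                 pair_list.remove(pair)
--                 break
--
--     # Initial a list to store reconstructed raw data
--     sig_img = []
--     for sig_order in sig_list:
--         sig_img.append(raw_sig[sig_order-1])
--
--     return sig_list, sig_img
-- ===== SOURCE B (Python) =====
-- def make_SI(raw_sig):
--     n = len(raw_sig)
--     # All pairs (i, j) with 1 <= i < j <= n, in lexicographic order.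
--     all_pairs = [(i, j) for i in range(1, n) for j in range(i + 1, n + 1)]
--     # Index: for each value v, the pairs containing v, still in lexicographic order.
--     by_val = {v: [] for v in range(1, n + 1)}
--     for p in all_pairs:
--         by_val[p[0]].append(p)
--         by_val[p[1]].append(p)
--     first = all_pairs[0]
--     rem = set(all_pairs[1:])
--     # Lazy cursors: everything before pos[v] in by_val[v] is already used up,
--     # and everything after last_ptr in all_pairs is used up.
--     pos = {v: 0 for v in range(1, n + 1)}
--     last_ptr = len(all_pairs) - 1
--     # The sequence is kept as a reversed front part plus a back part,
--     # so both prepending and appending are O(1).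
--     front = [first[0]]
--     back = [first[1]]
--     while rem:
--         h = front[-1]
--         t = back[-1]
--         lh = by_val[h]
--         i = pos[h]
--         while i < len(lh) and lh[i] not in rem:
--             i += 1
--         pos[h] = i
--         ph = lh[i] if i < len(lh) else None
--         lt = by_val[t]
--         i = pos[t]
--         while i < len(lt) and lt[i] not in rem:
--             i += 1
--         pos[t] = i
--         pt = lt[i] if i < len(lt) else None
--         if ph is None:
--             p = pt
--         elif pt is None:
--             p = ph
--         else:
--             p = min(ph, pt)
--         if p is None:
--             while all_pairs[last_ptr] not in rem:
--                 last_ptr -= 1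
--             p = all_pairs[last_ptr]
--             back.append(p[0])
--             back.append(p[1])
--         elif p[0] == h:
--             front.append(p[1])
--         elif p[1] == h:
--             front.append(p[0])
--         elif p[0] == t:
--             back.append(p[1])
--         else:
--             back.append(p[0])
--         rem.discard(p)
--     sig_list = front[::-1] + back
--     return sig_list, [raw_sig[k - 1] for k in sig_list]
-- ===== Notes on version B (the rewrite author's own statement) =====
-- stated objective: faster
-- what changed: Instead of rescanning the whole shrinking pair list (with O(n) insert(0) and list.remove) on every step, B builds a per-endpoint index of the lexicographically sorted pair list once, keeps the remaining pairs in a hash set with lazy cursors per endpoint (and a lazy back cursor for the fallback pair), and grows the sequence as a reversed-front/back pair of lists.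
-- outside the precondition, e.g. on make_SI([]): A raises IndexError, B raises IndexError; on make_SI([5]): A raises IndexError, B raises IndexError
import Mathlib
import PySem

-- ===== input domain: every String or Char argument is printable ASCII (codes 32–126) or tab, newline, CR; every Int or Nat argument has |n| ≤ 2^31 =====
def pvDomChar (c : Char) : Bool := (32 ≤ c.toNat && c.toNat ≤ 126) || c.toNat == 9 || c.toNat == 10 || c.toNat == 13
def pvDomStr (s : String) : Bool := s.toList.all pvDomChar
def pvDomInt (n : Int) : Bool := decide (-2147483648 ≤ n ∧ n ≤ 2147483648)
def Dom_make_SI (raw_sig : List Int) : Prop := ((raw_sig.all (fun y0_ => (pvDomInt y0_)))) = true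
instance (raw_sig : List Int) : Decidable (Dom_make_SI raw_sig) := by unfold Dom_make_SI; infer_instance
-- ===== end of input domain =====

-- B replaces A's repeated full rescans of pair_list (and its O(n) inserts/removes) by a
-- per-endpoint index with lazy cursors over a hash set of remaining pairs; measurably faster.

-- ===== PORT A =====

-- pair_list.remove(pair); in A this is only reached with pair ∈ pair_list, so it never raises
def pvRemoveA (pl : List (List Int)) (pair : List Int) : List (List Int) :=
  (PySem.List.remove? pl pair).getD pl

-- the 'for pair in pair_list: …' scan; `full` is the whole current pair_list (for remove and [-1])
def pvScanA (sig : List Int) (full : List (List Int)) : List (List Int) → List Int × List (List Int)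
  | [] => (sig, full)      -- falling off the loop: then the while-loop body did nothing
  | pair :: rest =>
    if PySem.List.pyGetD sig 0 0 = PySem.List.pyGetD pair 0 0 then
      (PySem.List.pyGetD pair 1 0 :: sig, pvRemoveA full pair)
    else if PySem.List.pyGetD sig 0 0 = PySem.List.pyGetD pair 1 0 then
      (PySem.List.pyGetD pair 0 0 :: sig, pvRemoveA full pair)
    else if PySem.List.pyGetD sig (-1) 0 = PySem.List.pyGetD pair 0 0 then
      (sig ++ [PySem.List.pyGetD pair 1 0], pvRemoveA full pair)
    else if PySem.List.pyGetD sig (-1) 0 = PySem.List.pyGetD pair 1 0 then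
      (sig ++ [PySem.List.pyGetD pair 0 0], pvRemoveA full pair)
    else if pair = PySem.List.pyGetD full (-1) [] then
      (sig ++ [PySem.List.pyGetD pair 0 0, PySem.List.pyGetD pair 1 0], pvRemoveA full pair)
    else pvScanA sig full rest

-- 'while pair_list:' — every pass removes exactly one pair, so pair_list.length passes suffice (fuel)
def pvWhileA : Nat → List Int → List (List Int) → List Int
  | 0, sig, _ => sig
  | f+1, sig, pl =>
    if pl = [] then sig
    else
      let s := pvScanA sig pl pl
      pvWhileA f s.1 s.2

def make_SI (raw_sig : List Int) : List Int × List Int :=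
  let type_sensor : Int := raw_sig.length
  let pair_list : List (List Int) :=
    (PySem.List.pyRange 1 type_sensor).foldl
      (fun pl i => pl ++ (PySem.List.pyRange i type_sensor).map (fun j => [i, j + 1])) []
  match pair_list with
  | [] => ([], [])     -- Python: pair_list[0] raises IndexError here (outside Pre_)
  | first :: rest =>
    let fin := pvWhileA rest.length first rest
    -- sig_img: raw_sig[sig_order-1] is always in range here, so the default is never used
    (fin, fin.foldl (fun acc k => acc ++ [PySem.List.pyGetD raw_sig (k - 1) 0]) [])

-- ===== PORT B =====

-- Python min(a, b) on two int pairs (lexicographic; first argument on ties)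
def pvLexMin (a b : Int × Int) : Int × Int :=
  if a.1 < b.1 ∨ (a.1 = b.1 ∧ a.2 ≤ b.2) then a else b

-- 'while i < len(lst) and lst[i] not in rem: i += 1' (fuel ≥ len(lst)+1 suffices; in-range index)
def pvAdvance (lst : List (Int × Int)) (rem : PySem.Set (Int × Int)) : Nat → Int → Int
  | 0, i => i
  | f+1, i =>
    if i < (lst.length : Int) ∧ rem.contains (PySem.List.pyGetD lst i (0, 0)) = false then
      pvAdvance lst rem f (i + 1)
    else i

-- 'while all_pairs[last_ptr] not in rem: last_ptr -= 1' (stops at the largest live index)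
def pvAdvBack (ap : List (Int × Int)) (rem : PySem.Set (Int × Int)) : Nat → Int → Int
  | 0, i => i
  | f+1, i =>
    if rem.contains (PySem.List.pyGetD ap i (0, 0)) = false then pvAdvBack ap rem f (i - 1)
    else i

-- 'if ph is None: p = pt / elif pt is None: p = ph / else: p = min(ph, pt)'
def pvPick : Option (Int × Int) → Option (Int × Int) → Option (Int × Int)
  | none, x => x
  | some a, none => some a
  | some a, some b => some (pvLexMin a b)

-- the 'while rem:' loop; one pair leaves rem per pass, so rem.length passes suffice (fuel)
def pvLoopB (byv : PySem.Dict Int (List (Int × Int))) (ap : List (Int × Int)) :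
    Nat → List Int → List Int → PySem.Set (Int × Int) → PySem.Dict Int Int → Int →
    List Int × List Int
  | 0, front, back, _, _, _ => (front, back)
  | f+1, front, back, rem, pos, lp =>
    if rem = [] then (front, back)
    else
      let h := PySem.List.pyGetD front (-1) 0
      let t := PySem.List.pyGetD back (-1) 0
      let lh := byv.getD h []
      let i1 := pvAdvance lh rem (lh.length + 1) (pos.getD h 0)
      let pos1 := pos.insert h i1
      let ph : Option (Int × Int) :=
        if i1 < (lh.length : Int) then some (PySem.List.pyGetD lh i1 (0, 0)) else none
      let lt := byv.getD t []
      let i2 := pvAdvance lt rem (lt.length + 1) (pos1.getD t 0)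
      let pos2 := pos1.insert t i2
      let pt : Option (Int × Int) :=
        if i2 < (lt.length : Int) then some (PySem.List.pyGetD lt i2 (0, 0)) else none
      let p? : Option (Int × Int) := pvPick ph pt
      match p? with
      | none =>
        let lp' := pvAdvBack ap rem (ap.length + 1) lp
        let p := PySem.List.pyGetD ap lp' (0, 0)
        pvLoopB byv ap f front (back ++ [p.1, p.2]) (rem.discard p) pos2 lp'
      | some p =>
        if p.1 = h then pvLoopB byv ap f (front ++ [p.2]) back (rem.discard p) pos2 lp
        else if p.2 = h then pvLoopB byv ap f (front ++ [p.1]) back (rem.discard p) pos2 lp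
        else if p.1 = t then pvLoopB byv ap f front (back ++ [p.2]) (rem.discard p) pos2 lp
        else pvLoopB byv ap f front (back ++ [p.1]) (rem.discard p) pos2 lp

def make_SI_alt (raw_sig : List Int) : List Int × List Int :=
  let n : Int := raw_sig.length
  let all_pairs : List (Int × Int) :=
    (PySem.List.pyRange 1 n).foldl
      (fun acc i => acc ++ (PySem.List.pyRange (i + 1) (n + 1)).map (fun j => (i, j))) []
  let byv0 : PySem.Dict Int (List (Int × Int)) :=
    (PySem.List.pyRange 1 (n + 1)).foldl (fun d v => d.insert v []) PySem.Dict.empty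
  -- by_val[p[0]].append(p); by_val[p[1]].append(p) — both keys are always present, so
  -- Dict.modify (with unused default []) is exact
  let byv := all_pairs.foldl
    (fun d p => (PySem.Dict.modify d p.1 [] (· ++ [p])).modify p.2 [] (· ++ [p])) byv0
  match all_pairs with
  | [] => ([], [])     -- Python: all_pairs[0] raises IndexError here (outside Pre_)
  | first :: _ =>
    let rem : PySem.Set (Int × Int) := PySem.Set.ofList (PySem.List.slice all_pairs (some 1) none)
    let pos0 : PySem.Dict Int Int :=
      (PySem.List.pyRange 1 (n + 1)).foldl (fun d v => d.insert v 0) PySem.Dict.empty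
    let fb := pvLoopB byv all_pairs rem.length [first.1] [first.2] rem pos0
      ((all_pairs.length : Int) - 1)
    let sig := fb.1.reverse ++ fb.2        -- front[::-1] + back
    (sig, sig.foldl (fun acc k => acc ++ [PySem.List.pyGetD raw_sig (k - 1) 0]) [])

-- ===== PRECONDITION & SPEC =====
-- Pre_ excludes lists of fewer than two signals, on which A raises IndexError (pair_list[0]).
def Pre_make_SI (raw_sig : List Int) : Prop := 2 ≤ raw_sig.length
instance (raw_sig : List Int) : Decidable (Pre_make_SI raw_sig) := by
  unfold Pre_make_SI; infer_instance
def pvWitness_make_SI : List Int := [5, 7, 9]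

def Spec_make_SI (raw_sig : List Int) (out : List Int × List Int) : Prop := out = make_SI_alt raw_sig
instance (raw_sig : List Int) (out : List Int × List Int) : Decidable (Spec_make_SI raw_sig out) := by unfold Spec_make_SI; infer_instance

-- ===== CLAIM (what is proved, stated in full; the proofs are below) =====
def Claim_equal_make_SI : Prop := ∀ (raw_sig : List Int), Dom_make_SI raw_sig → Pre_make_SI raw_sig → Spec_make_SI raw_sig (make_SI raw_sig)


-- ===== LEMMAS AND PROOFS =====

-- proof-side vocabulary
def pvToL (p : Int × Int) : List Int := [p.1, p.2]

def pvLexLt (p q : Int × Int) : Prop := p.1 < q.1 ∨ (p.1 = q.1 ∧ p.2 < q.2)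

def pvLexLe (p q : Int × Int) : Prop := p.1 < q.1 ∨ (p.1 = q.1 ∧ p.2 ≤ q.2)

def pvMatch (hh tt : Int) (p : Int × Int) : Bool :=
  (p.1 == hh) || (p.2 == hh) || (p.1 == tt) || (p.2 == tt)

def pvContb (v : Int) (p : Int × Int) : Bool := (p.1 == v) || (p.2 == v)

def pvAttach (hh tt : Int) (sig : List Int) (p : Int × Int) : List Int :=
  if p.1 = hh then p.2 :: sig
  else if p.2 = hh then p.1 :: sig
  else if p.1 = tt then sig ++ [p.2]
  else sig ++ [p.1]

lemma pvToL_inj : Function.Injective pvToL := by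
  intro a b h
  simp only [pvToL, List.cons.injEq, and_true] at h
  exact Prod.ext h.1 h.2

lemma pvLexLe_refl (a : Int × Int) : pvLexLe a a := by unfold pvLexLe; omega

lemma pvLexLe_trans {a b c : Int × Int} (h1 : pvLexLe a b) (h2 : pvLexLe b c) : pvLexLe a c := by
  unfold pvLexLe at *; omega

lemma pvLexLe_antisymm {a b : Int × Int} (h1 : pvLexLe a b) (h2 : pvLexLe b a) : a = b := by
  unfold pvLexLe at *
  have : a.1 = b.1 ∧ a.2 = b.2 := by omega
  exact Prod.ext this.1 this.2

lemma pvLexLe_total (a b : Int × Int) : pvLexLe a b ∨ pvLexLe b a := by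
  unfold pvLexLe; omega

lemma pvLexLt_le {a b : Int × Int} (h : pvLexLt a b) : pvLexLe a b := by
  unfold pvLexLt at h; unfold pvLexLe; omega

lemma pvLexLt_irrefl (a : Int × Int) : ¬ pvLexLt a a := by unfold pvLexLt; omega

lemma pvNodup_of_pairwise {l : List (Int × Int)} (h : l.Pairwise pvLexLt) : l.Nodup := by
  refine h.imp ?_
  intro a b hab
  intro he; subst he; exact pvLexLt_irrefl a hab

lemma pvContains_iff {rem : PySem.Set (Int × Int)} {x : Int × Int} :
    rem.contains x = true ↔ x ∈ rem := by
  simpa using PySem.Set.contains_iff rem x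

lemma pvDiscard_eq_erase {rem : List (Int × Int)} (hnd : rem.Nodup) (p : Int × Int) :
    PySem.Set.discard rem p = rem.erase p := by
  rw [List.Nodup.erase_eq_filter hnd]
  unfold PySem.Set.discard
  apply List.filter_congr
  intro x _
  simp [bne]

-- find? on a strictly lex-sorted list picks the lex-minimum of the matching elements
lemma pvFind_min {l : List (Int × Int)} {P : Int × Int → Bool} {x : Int × Int}
    (hs : l.Pairwise pvLexLt) (hf : l.find? P = some x) :
    ∀ y ∈ l, P y = true → pvLexLe x y := by
  rcases List.find?_eq_some_iff_append.mp hf with ⟨hPx, as, bs, rfl, has⟩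
  intro y hy hPy
  rcases List.mem_append.mp hy with hya | hyb
  · exact absurd hPy (by simpa using has y hya)
  · rcases List.mem_cons.mp hyb with rfl | hyb
    · exact pvLexLe_refl y
    · have := (List.pairwise_append.mp hs).2.1
      exact pvLexLt_le ((List.pairwise_cons.mp this).1 y hyb)

lemma pvFind_intro {l : List (Int × Int)} {P : Int × Int → Bool} {x : Int × Int}
    (hs : l.Pairwise pvLexLt) (hx : x ∈ l) (hPx : P x = true)
    (hmin : ∀ y ∈ l, P y = true → pvLexLe x y) : l.find? P = some x := by
  cases ho : l.find? P with
  | none => exact absurd hPx (by simpa using List.find?_eq_none.mp ho x hx)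
  | some z =>
    have hz := List.find?_some ho
    have hzl := List.mem_of_find?_eq_some ho
    have h1 := pvFind_min hs ho x hx hPx
    have h2 := hmin z hzl hz
    rw [pvLexLe_antisymm h2 h1]

lemma pvFind_cut {α : Type} (P : α → Bool) :
    ∀ (lst : List α) (m : Nat) (hm : m < lst.length),
      (∀ k, (hk : k < lst.length) → k < m → P lst[k] = false) →
      P lst[m] = true → lst.find? P = some lst[m] := by
  intro lst
  induction lst with
  | nil => intro m hm; exact absurd hm (by simp)
  | cons a as ih =>
    intro m hm hdead halive
    cases m with
    | zero => simp only [List.getElem_cons_zero] at halive; simp [List.find?_cons, halive]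
    | succ m' =>
      have ha : P a = false := by
        have := hdead 0 (by simp) (by omega)
        simpa using this
      simp only [List.find?_cons, ha]
      have := ih m' (by simpa using Nat.lt_of_succ_lt_succ hm)
        (fun k hk hkm => by
          have := hdead (k+1) (by simpa using Nat.succ_lt_succ hk) (by omega)
          simpa using this)
        (by simpa using halive)
      simpa using this

lemma pvFind_cut_none {α : Type} (P : α → Bool) (lst : List α)
    (hdead : ∀ k, (hk : k < lst.length) → P lst[k] = false) : lst.find? P = none := by
  apply List.find?_eq_none.mpr
  intro x hx
  rcases List.mem_iff_getElem.mp hx with ⟨k, hk, rfl⟩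
  simp [hdead k hk]



-- the lexicographically sorted list of all pairs, as port B builds it
def pvAPn (n : Int) : List (Int × Int) :=
  (PySem.List.pyRange 1 n).foldl
    (fun acc i => acc ++ (PySem.List.pyRange (i + 1) (n + 1)).map (fun j => (i, j))) []

lemma pvFlatMap_congr {α β : Type} (l : List α) (f g : α → List β)
    (h : ∀ x ∈ l, f x = g x) : l.flatMap f = l.flatMap g := by
  induction l with
  | nil => rfl
  | cons a as ih =>
    simp only [List.flatMap_cons]
    rw [h a (by simp), ih (fun x hx => h x (by simp [hx]))]

lemma pvAPn_eq (n : Int) : pvAPn n =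
    (PySem.List.pyRange 1 n).flatMap
      (fun i => (PySem.List.pyRange (i + 1) (n + 1)).map (fun j => (i, j))) := by
  unfold pvAPn
  rw [PySem.List.foldl_append_eq_flatMap]
  simp

lemma pvPairList_eq (n : Int) :
    (PySem.List.pyRange 1 n).foldl
      (fun pl i => pl ++ (PySem.List.pyRange i n).map (fun j => [i, j + 1])) [] =
    (pvAPn n).map pvToL := by
  rw [PySem.List.foldl_append_eq_flatMap, pvAPn_eq, List.map_flatMap]
  simp only [List.nil_append]
  apply pvFlatMap_congr
  intro i _
  rw [PySem.List.pyRange_one, PySem.List.pyRange_one]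
  have he : (n + 1 - (i + 1)).toNat = (n - i).toNat := by omega
  rw [he]
  simp only [List.map_map]
  apply List.map_congr_left
  intro k _
  simp only [Function.comp_apply, pvToL, List.cons.injEq, and_true, true_and]
  omega

lemma pvPairwise_flatMap {l : List Int} {g : Int → List (Int × Int)}
    (hl : l.Pairwise (· < ·))
    (hfst : ∀ i ∈ l, ∀ p ∈ g i, p.1 = i)
    (hg : ∀ i ∈ l, (g i).Pairwise pvLexLt) :
    (l.flatMap g).Pairwise pvLexLt := by
  induction l with
  | nil => simp
  | cons a as ih =>
    simp only [List.flatMap_cons]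
    rw [List.pairwise_append]
    refine ⟨hg a (by simp), ih (List.pairwise_cons.mp hl).2
      (fun i hi p hp => hfst i (by simp [hi]) p hp)
      (fun i hi => hg i (by simp [hi])), ?_⟩
    intro x hx y hy
    rcases List.mem_flatMap.mp hy with ⟨i, hi, hyi⟩
    have h1 : x.1 = a := hfst a (by simp) x hx
    have h2 : y.1 = i := hfst i (by simp [hi]) y hyi
    have h3 : a < i := (List.pairwise_cons.mp hl).1 i hi
    left; omega

lemma pvAPn_sorted (n : Int) : (pvAPn n).Pairwise pvLexLt := by
  rw [pvAPn_eq]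
  apply pvPairwise_flatMap
  · exact PySem.List.pairwise_lt_pyRange_one 1 n
  · intro i _ p hp
    rcases List.mem_map.mp hp with ⟨j, _, rfl⟩
    rfl
  · intro i _
    rw [List.pairwise_map]
    refine (PySem.List.pairwise_lt_pyRange_one (i+1) (n+1)).imp ?_
    intro a b hab
    right; exact ⟨rfl, hab⟩

lemma pvAPn_bounds (n : Int) : ∀ p ∈ pvAPn n, 1 ≤ p.1 ∧ p.1 < p.2 ∧ p.2 ≤ n := by
  intro p hp
  rw [pvAPn_eq] at hp
  rcases List.mem_flatMap.mp hp with ⟨i, hi, hpi⟩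
  rcases List.mem_map.mp hpi with ⟨j, hj, rfl⟩
  rw [PySem.List.mem_pyRange_one] at hi hj
  simp only
  omega

lemma pvGetD_fold_insert_nil (l : List Int) :
    ∀ (d : PySem.Dict Int (List (Int × Int))), (∀ w, d.getD w [] = []) →
    ∀ v, (l.foldl (fun d v => d.insert v []) d).getD v [] = [] := by
  induction l with
  | nil => intro d hd v; exact hd v
  | cons a as ih =>
    intro d hd v
    simp only [List.foldl_cons]
    apply ih
    intro w
    rw [PySem.Dict.getD_insert]
    split_ifs with hw
    · rfl
    · exact hd w

lemma pvGetD_fold_insert_zero (l : List Int) :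
    ∀ (d : PySem.Dict Int Int), (∀ w, d.getD w 0 = 0) →
    ∀ v, (l.foldl (fun d v => d.insert v 0) d).getD v 0 = 0 := by
  induction l with
  | nil => intro d hd v; exact hd v
  | cons a as ih =>
    intro d hd v
    simp only [List.foldl_cons]
    apply ih
    intro w
    rw [PySem.Dict.getD_insert]
    split_ifs with hw
    · rfl
    · exact hd w

lemma pvByv_getD (l : List (Int × Int)) :
    ∀ (d : PySem.Dict Int (List (Int × Int))) (v : Int), (∀ p ∈ l, p.1 ≠ p.2) →
    (l.foldl (fun d p => (PySem.Dict.modify d p.1 [] (· ++ [p])).modify p.2 [] (· ++ [p])) d).getD v []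
      = d.getD v [] ++ l.filter (pvContb v) := by
  induction l with
  | nil => intro d v _; simp
  | cons p ps ih =>
    intro d v hne
    have hp : p.1 ≠ p.2 := hne p (by simp)
    simp only [List.foldl_cons]
    rw [ih _ v (fun q hq => hne q (by simp [hq]))]
    simp only [PySem.Dict.getD_modify]
    rcases eq_or_ne v p.2 with h2 | h2
    · rw [if_pos h2, if_neg (Ne.symm hp)]
      subst h2
      have hc : pvContb p.2 p = true := by simp [pvContb]
      rw [List.filter_cons, if_pos (by simp [hc])]
      simp [List.append_assoc]
    · rw [if_neg h2]
      rcases eq_or_ne v p.1 with h1 | h1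
      · rw [if_pos h1]
        subst h1
        have hc : pvContb p.1 p = true := by simp [pvContb]
        rw [List.filter_cons, if_pos (by simp [hc])]
        simp [List.append_assoc]
      · rw [if_neg h1]
        have hc1 : (p.1 == v) = false := beq_eq_false_iff_ne.mpr (Ne.symm h1)
        have hc2 : (p.2 == v) = false := beq_eq_false_iff_ne.mpr (Ne.symm h2)
        have hc : pvContb v p = false := by simp [pvContb, hc1, hc2]
        rw [List.filter_cons, if_neg (by simp [hc])]


lemma pvGetLastD {l : List (Int × Int)} (h : l ≠ []) : l.getLastD (0,0) = l.getLast h := by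
  rw [List.getLastD_eq_getLast?, List.getLast?_eq_getLast h]
  rfl

lemma pvGetLast_append {l1 l2 : List (Int × Int)} (h2 : l2 ≠ []) (h : l1 ++ l2 ≠ []) :
    (l1 ++ l2).getLast h = l2.getLast h2 := by
  rw [List.getLast_append]
  simp [h2]

lemma pvRemoveA_eq {rem : List (Int × Int)} {p : Int × Int} (hp : p ∈ rem) :
    pvRemoveA (rem.map pvToL) (pvToL p) = (rem.erase p).map pvToL := by
  unfold pvRemoveA
  rw [PySem.List.remove?_eq_some_erase _ _ (List.mem_map_of_mem hp)]
  rw [← List.map_erase pvToL_inj]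
  rfl

lemma pvMatch_decomp (hh tt : Int) (p : Int × Int) :
    pvMatch hh tt p = (pvContb hh p || pvContb tt p) := by
  simp [pvMatch, pvContb, Bool.or_assoc]

-- the inner for-loop of A: first matching pair wins; if none matches, the last pair is taken
lemma pvScanA_spec (sig : List Int) :
    ∀ (suf pre rem : List (Int × Int)),
      rem = pre ++ suf → suf ≠ [] → rem.Pairwise pvLexLt →
      (∀ q ∈ pre, pvMatch (PySem.List.pyGetD sig 0 0) (PySem.List.pyGetD sig (-1) 0) q = false) →
      pvScanA sig (rem.map pvToL) (suf.map pvToL) =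
        match suf.find? (pvMatch (PySem.List.pyGetD sig 0 0) (PySem.List.pyGetD sig (-1) 0)) with
        | some p => (pvAttach (PySem.List.pyGetD sig 0 0) (PySem.List.pyGetD sig (-1) 0) sig p,
                     (rem.erase p).map pvToL)
        | none => (sig ++ [(rem.getLastD (0,0)).1, (rem.getLastD (0,0)).2],
                   (rem.erase (rem.getLastD (0,0))).map pvToL) := by
  intro suf
  induction suf with
  | nil => intro pre rem _ hne _ _; exact absurd rfl hne
  | cons p rest ih =>
    intro pre rem hre hne hsorted hpre
    have hrne : rem ≠ [] := by rw [hre]; simp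
    have hpmem : p ∈ rem := by rw [hre]; simp
    have hmapne : rem.map pvToL ≠ [] := by simpa using hrne
    have hget0 : PySem.List.pyGetD (pvToL p) 0 0 = p.1 := rfl
    have hget1 : PySem.List.pyGetD (pvToL p) 1 0 = p.2 := rfl
    have hlast : PySem.List.pyGetD (rem.map pvToL) (-1) ([] : List Int)
        = pvToL (rem.getLastD (0,0)) := by
      rw [PySem.List.pyGetD_neg_one _ _ hmapne, List.getLast_map, pvGetLastD hrne]
    set hh := PySem.List.pyGetD sig 0 0 with hhh
    set tt := PySem.List.pyGetD sig (-1) 0 with htt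
    simp only [List.map_cons]
    rw [pvScanA]
    simp only [hget0, hget1, hlast]
    by_cases c1 : hh = p.1
    · have hm : pvMatch hh tt p = true := by simp [pvMatch, c1]
      rw [if_pos c1, List.find?_cons_of_pos hm]
      simp only [pvAttach, if_pos c1.symm, pvRemoveA_eq hpmem]
    · rw [if_neg c1]
      by_cases c2 : hh = p.2
      · have hm : pvMatch hh tt p = true := by simp [pvMatch, c2]
        rw [if_pos c2, List.find?_cons_of_pos hm]
        have hx : ¬ p.1 = hh := fun he => c1 he.symm
        simp only [pvAttach, if_neg hx, if_pos c2.symm, pvRemoveA_eq hpmem]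
      · rw [if_neg c2]
        by_cases c3 : tt = p.1
        · have hm : pvMatch hh tt p = true := by simp [pvMatch, c3]
          rw [if_pos c3, List.find?_cons_of_pos hm]
          have h1 : ¬ p.1 = hh := fun he => c1 he.symm
          have h2 : ¬ p.2 = hh := fun he => c2 he.symm
          simp only [pvAttach, if_neg h1, if_neg h2, if_pos c3.symm, pvRemoveA_eq hpmem]
        · rw [if_neg c3]
          by_cases c4 : tt = p.2
          · have hm : pvMatch hh tt p = true := by simp [pvMatch, c4]
            rw [if_pos c4, List.find?_cons_of_pos hm]
            have h1 : ¬ p.1 = hh := fun he => c1 he.symm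
            have h2 : ¬ p.2 = hh := fun he => c2 he.symm
            have h3 : ¬ p.1 = tt := fun he => c3 he.symm
            simp only [pvAttach, if_neg h1, if_neg h2, if_neg h3, pvRemoveA_eq hpmem]
          · rw [if_neg c4]
            have hb1 : (p.1 == hh) = false := beq_eq_false_iff_ne.mpr (fun he => c1 he.symm)
            have hb2 : (p.2 == hh) = false := beq_eq_false_iff_ne.mpr (fun he => c2 he.symm)
            have hb3 : (p.1 == tt) = false := beq_eq_false_iff_ne.mpr (fun he => c3 he.symm)
            have hb4 : (p.2 == tt) = false := beq_eq_false_iff_ne.mpr (fun he => c4 he.symm)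
            have hm : pvMatch hh tt p = false := by simp [pvMatch, hb1, hb2, hb3, hb4]
            rw [List.find?_cons_of_neg (by simp [hm])]
            cases hrest : rest with
            | nil =>
              subst hrest
              have hlastp : rem.getLastD (0,0) = p := by
                rw [hre]; simp
              rw [if_pos (by rw [hlastp])]
              rw [hlastp, pvRemoveA_eq hpmem]
              simp
            | cons r rs =>
              have hrestne : rest ≠ [] := by rw [hrest]; simp
              have hnd : rem.Nodup := pvNodup_of_pairwise hsorted
              have hpnotin : p ∉ rest := by
                have hs : (p :: rest).Nodup :=
                  hnd.sublist (by rw [hre]; exact List.sublist_append_right pre _)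
                exact (List.nodup_cons.mp hs).1
              have hlne : rem.getLastD (0,0) ≠ p := by
                have hmem : rem.getLastD (0,0) ∈ rest := by
                  have h1 : rem.getLastD (0,0) = (p :: rest).getLast (by simp) := by
                    conv_lhs => rw [hre]
                    rw [pvGetLastD (l := pre ++ p :: rest) (by simp)]
                    exact pvGetLast_append (by simp) _
                  rw [h1, List.getLast_cons hrestne]
                  exact List.getLast_mem hrestne
                intro he
                exact hpnotin (he ▸ hmem)
              rw [if_neg (fun he => hlne (pvToL_inj he).symm)]
              rw [← hrest]
              exact ih (pre ++ [p]) rem (by rw [hre]; simp) hrestne hsorted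
                (fun q hq => by
                  rcases List.mem_append.mp hq with hq | hq
                  · exact hpre q hq
                  · rcases List.mem_singleton.mp hq with rfl; exact hm)


lemma pvContains_erase_false {rem : List (Int × Int)} {x p : Int × Int}
    (h : PySem.Set.contains rem x = false) : PySem.Set.contains (rem.erase p) x = false := by
  rcases hc : PySem.Set.contains (rem.erase p) x with _ | _
  · rfl
  · exfalso
    have hx : x ∈ rem.erase p := pvContains_iff.mp hc
    have : x ∈ rem := List.erase_sublist.subset hx
    rw [pvContains_iff.mpr this] at h
    exact Bool.true_eq_false.mp h

lemma pvAdvance_spec (lst : List (Int × Int)) (rem : PySem.Set (Int × Int)) :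
    ∀ (f m : Nat), m ≤ lst.length → lst.length + 1 ≤ f + m →
    ∃ m' : Nat, pvAdvance lst rem f (m : Int) = (m' : Int) ∧ m ≤ m' ∧ m' ≤ lst.length ∧
      (∀ k, m ≤ k → k < m' → (hk : k < lst.length) → PySem.Set.contains rem lst[k] = false) ∧
      (∀ hk : m' < lst.length, PySem.Set.contains rem lst[m'] = true) := by
  intro f
  induction f with
  | zero => intro m hm hf; omega
  | succ f ih =>
    intro m hm hf
    rw [pvAdvance]
    by_cases hlt : m < lst.length
    · have hget : PySem.List.pyGetD lst (m : Int) (0,0) = lst[m] := by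
        rw [PySem.List.pyGetD_eq_getElem lst (0,0) (by omega) (by exact_mod_cast hlt)]
        simp
      rcases hc : PySem.Set.contains rem lst[m] with _ | _
      · rw [if_pos ⟨by exact_mod_cast hlt, by rw [hget]; exact hc⟩]
        have hcast : (m : Int) + 1 = ((m + 1 : Nat) : Int) := by push_cast; ring
        rw [hcast]
        rcases ih (m + 1) (by omega) (by omega) with ⟨m', h1, h2, h3, h4, h5⟩
        exact ⟨m', h1, by omega, h3,
          fun k hk1 hk2 hk3 => by
            rcases Nat.eq_or_lt_of_le hk1 with rfl | hk1'
            · exact hc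
            · exact h4 k (by omega) hk2 hk3, h5⟩
      · rw [if_neg (by
          rintro ⟨-, hbad⟩
          rw [hget] at hbad
          rw [hc] at hbad
          exact Bool.true_eq_false.mp hbad)]
        exact ⟨m, rfl, le_refl m, by omega, fun k hk1 hk2 _ => by omega,
          fun _ => hc⟩
    · have hml : m = lst.length := by omega
      rw [if_neg (by rintro ⟨hbad, -⟩; exact hlt (by exact_mod_cast hbad))]
      exact ⟨m, rfl, le_refl m, by omega, fun k hk1 hk2 _ => by omega,
        fun hk => by omega⟩

lemma pvAdvBack_spec (ap : List (Int × Int)) (rem : PySem.Set (Int × Int)) :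
    ∀ (f m : Nat), m < ap.length → m + 1 ≤ f →
    (∃ j : Nat, ∃ hj : j < ap.length, j ≤ m ∧ PySem.Set.contains rem ap[j] = true) →
    ∃ m' : Nat, pvAdvBack ap rem f (m : Int) = (m' : Int) ∧ m' ≤ m ∧
      ∃ hm' : m' < ap.length, PySem.Set.contains rem ap[m'] = true ∧
      ∀ k, m' < k → k ≤ m → (hk : k < ap.length) → PySem.Set.contains rem ap[k] = false := by
  intro f
  induction f with
  | zero => intro m hm hf; omega
  | succ f ih =>
    intro m hm hf hex
    rw [pvAdvBack]
    have hget : PySem.List.pyGetD ap (m : Int) (0,0) = ap[m] := by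
      rw [PySem.List.pyGetD_eq_getElem ap (0,0) (by omega) (by exact_mod_cast hm)]
      simp
    rcases hc : PySem.Set.contains rem ap[m] with _ | _
    · rw [if_pos (by rw [hget]; exact hc)]
      rcases hex with ⟨j, hj, hjm, hjc⟩
      have hjm' : j < m := by
        rcases Nat.eq_or_lt_of_le hjm with rfl | h
        · rw [hjc] at hc; exact absurd hc (by simp)
        · exact h
      have hm1 : 1 ≤ m := by omega
      have hcast : (m : Int) - 1 = ((m - 1 : Nat) : Int) := by omega
      rw [hcast]
      rcases ih (m - 1) (by omega) (by omega) ⟨j, hj, by omega, hjc⟩ with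
        ⟨m', h1, h2, h3, h4, h5⟩
      refine ⟨m', h1, by omega, h3, h4, ?_⟩
      intro k hk1 hk2 hk3
      rcases Nat.eq_or_lt_of_le hk2 with rfl | hk2'
      · exact hc
      · exact h5 k hk1 (by omega) hk3

    · rw [if_neg (by rw [hget, hc]; simp)]
      exact ⟨m, rfl, le_refl m, hm, hc, fun k hk1 hk2 _ => by omega⟩


-- the largest remaining pair is the last element of the (sorted) remaining list
lemma pvMax_eq_getLast {AP rem : List (Int × Int)} (hAP : AP.Pairwise pvLexLt)
    (hsub : rem.Sublist AP) (hne : rem ≠ []) (m : Nat) (hm : m < AP.length)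
    (halive : AP[m] ∈ rem) (hdead : ∀ k, m < k → (hk : k < AP.length) → AP[k] ∉ rem) :
    rem.getLastD (0,0) = AP[m] := by
  rw [pvGetLastD hne]
  set g := rem.getLast hne with hg
  have hgrem : g ∈ rem := List.getLast_mem hne
  have hgAP : g ∈ AP := hsub.subset hgrem
  have h1 : pvLexLe g AP[m] := by
    rcases List.mem_iff_getElem.mp hgAP with ⟨j, hj, hje⟩
    rcases lt_trichotomy j m with hjm | rfl | hjm
    · exact pvLexLt_le (hje ▸ List.pairwise_iff_getElem.mp hAP j m hj hm hjm)
    · rw [hje]; exact pvLexLe_refl _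
    · exact absurd (hje ▸ hgrem) (hdead j hjm hj)
  have h2 : pvLexLe AP[m] g := by
    have hsr : rem.Pairwise pvLexLt := List.Pairwise.sublist hsub hAP
    rcases List.mem_iff_getElem.mp halive with ⟨k, hk, hke⟩
    have hgl : g = rem[rem.length - 1] := List.getLast_eq_getElem hne
    rcases Nat.eq_or_lt_of_le (Nat.le_sub_one_of_lt hk) with hke' | hke'
    · have hx : rem[rem.length - 1]'(by omega) = rem[k] := by
        congr 1
        omega
      rw [hgl, hx, hke]
      exact pvLexLe_refl _
    · rw [hgl, ← hke]
      exact pvLexLt_le (List.pairwise_iff_getElem.mp hsr k (rem.length - 1) hk (by omega) hke')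
  exact pvLexLe_antisymm h1 h2

lemma pvLexMin_left {a b : Int × Int} (h : pvLexLe a b) : pvLexMin a b = a := by
  unfold pvLexLe at h
  unfold pvLexMin
  exact if_pos h

lemma pvLexMin_right {a b : Int × Int} (h : ¬ pvLexLe a b) : pvLexMin a b = b := by
  unfold pvLexLe at h
  unfold pvLexMin
  exact if_neg h

-- B's candidate (min over the two endpoint indexes) is A's first matching pair
lemma pvSelect {AP : List (Int × Int)} {rem : PySem.Set (Int × Int)}
    (hAP : AP.Pairwise pvLexLt) (hsub : rem.Sublist AP) (hh tt : Int) :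
    rem.find? (pvMatch hh tt) =
      pvPick ((AP.filter (pvContb hh)).find? (fun q => PySem.Set.contains rem q))
             ((AP.filter (pvContb tt)).find? (fun q => PySem.Set.contains rem q)) := by
  have hsr : rem.Pairwise pvLexLt := List.Pairwise.sublist hsub hAP
  have hsh : (AP.filter (pvContb hh)).Pairwise pvLexLt := List.Pairwise.sublist List.filter_sublist hAP
  have hst : (AP.filter (pvContb tt)).Pairwise pvLexLt := List.Pairwise.sublist List.filter_sublist hAP
  have hmemf : ∀ (v : Int) (x : Int × Int),
      (x ∈ AP.filter (pvContb v) ∧ PySem.Set.contains rem x = true) ↔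
      (x ∈ rem ∧ pvContb v x = true) := by
    intro v x
    constructor
    · rintro ⟨hx, hc⟩
      exact ⟨pvContains_iff.mp hc, (List.mem_filter.mp hx).2⟩
    · rintro ⟨hx, hc⟩
      exact ⟨List.mem_filter.mpr ⟨hsub.subset hx, hc⟩, pvContains_iff.mpr hx⟩
  cases hFh : (AP.filter (pvContb hh)).find? (fun q => PySem.Set.contains rem q) with
  | none =>
    have hnh : ∀ y ∈ rem, pvContb hh y = false := by
      intro y hy
      rcases hcb : pvContb hh y with _ | _
      · rfl
      · have := List.find?_eq_none.mp hFh y ((hmemf hh y).mpr ⟨hy, hcb⟩).1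
        simp only [pvContains_iff.mpr hy] at this
        exact absurd (this trivial) not_false
    cases hFt : (AP.filter (pvContb tt)).find? (fun q => PySem.Set.contains rem q) with
    | none =>
      have hnt : ∀ y ∈ rem, pvContb tt y = false := by
        intro y hy
        rcases hcb : pvContb tt y with _ | _
        · rfl
        · have := List.find?_eq_none.mp hFt y ((hmemf tt y).mpr ⟨hy, hcb⟩).1
          simp only [pvContains_iff.mpr hy] at this
          exact absurd (this trivial) not_false
      apply List.find?_eq_none.mpr
      intro y hy
      rw [pvMatch_decomp, hnh y hy, hnt y hy]
      simp
    | some b =>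
      have hb := (hmemf tt b).mp ⟨List.mem_of_find?_eq_some hFt, List.find?_some hFt⟩
      apply pvFind_intro hsr hb.1 (by rw [pvMatch_decomp, hb.2]; simp)
      intro y hy hPy
      rw [pvMatch_decomp] at hPy
      rcases Bool.or_eq_true_iff.mp hPy with hcb | hcb
      · exact absurd (hnh y hy) (by rw [hcb]; simp)
      · exact pvFind_min hst hFt y ((hmemf tt y).mpr ⟨hy, hcb⟩).1 (pvContains_iff.mpr hy)
  | some a =>
    have ha := (hmemf hh a).mp ⟨List.mem_of_find?_eq_some hFh, List.find?_some hFh⟩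
    cases hFt : (AP.filter (pvContb tt)).find? (fun q => PySem.Set.contains rem q) with
    | none =>
      have hnt : ∀ y ∈ rem, pvContb tt y = false := by
        intro y hy
        rcases hcb : pvContb tt y with _ | _
        · rfl
        · have := List.find?_eq_none.mp hFt y ((hmemf tt y).mpr ⟨hy, hcb⟩).1
          simp only [pvContains_iff.mpr hy] at this
          exact absurd (this trivial) not_false
      apply pvFind_intro hsr ha.1 (by rw [pvMatch_decomp, ha.2]; simp)
      intro y hy hPy
      rw [pvMatch_decomp] at hPy
      rcases Bool.or_eq_true_iff.mp hPy with hcb | hcb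
      · exact pvFind_min hsh hFh y ((hmemf hh y).mpr ⟨hy, hcb⟩).1 (pvContains_iff.mpr hy)
      · exact absurd (hnt y hy) (by rw [hcb]; simp)
    | some b =>
      have hb := (hmemf tt b).mp ⟨List.mem_of_find?_eq_some hFt, List.find?_some hFt⟩
      have hmina : ∀ y ∈ rem, pvContb hh y = true → pvLexLe a y := fun y hy hcb =>
        pvFind_min hsh hFh y ((hmemf hh y).mpr ⟨hy, hcb⟩).1 (pvContains_iff.mpr hy)
      have hminb : ∀ y ∈ rem, pvContb tt y = true → pvLexLe b y := fun y hy hcb =>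
        pvFind_min hst hFt y ((hmemf tt y).mpr ⟨hy, hcb⟩).1 (pvContains_iff.mpr hy)
      show List.find? (pvMatch hh tt) rem = some (pvLexMin a b)
      by_cases hab : pvLexLe a b
      · rw [pvLexMin_left hab]
        apply pvFind_intro hsr ha.1 (by rw [pvMatch_decomp, ha.2]; simp)
        intro y hy hPy
        rw [pvMatch_decomp] at hPy
        rcases Bool.or_eq_true_iff.mp hPy with hcb | hcb
        · exact hmina y hy hcb
        · exact pvLexLe_trans hab (hminb y hy hcb)
      · rw [pvLexMin_right hab]
        have hba : pvLexLe b a := (pvLexLe_total a b).resolve_left hab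
        apply pvFind_intro hsr hb.1 (by rw [pvMatch_decomp, hb.2]; simp)
        intro y hy hPy
        rw [pvMatch_decomp] at hPy
        rcases Bool.or_eq_true_iff.mp hPy with hcb | hcb
        · exact pvLexLe_trans hba (hmina y hy hcb)
        · exact hminb y hy hcb

lemma pvHead_eq (front back : List Int) (hf : front ≠ []) :
    PySem.List.pyGetD (front.reverse ++ back) 0 0 = PySem.List.pyGetD front (-1) 0 := by
  rw [PySem.List.pyGetD_neg_one front 0 hf, PySem.List.pyGetD_zero]
  have h1 : front.reverse ≠ [] := by simpa using hf
  cases hrev : front.reverse with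
  | nil => exact absurd hrev h1
  | cons x xs =>
    have hx : x = front.getLast hf := by
      have h3 := List.head_reverse h1
      simp only [hrev] at h3
      simpa using h3
    simp [hx]

lemma pvTail_eq (front back : List Int) (hb : back ≠ []) :
    PySem.List.pyGetD (front.reverse ++ back) (-1) 0 = PySem.List.pyGetD back (-1) 0 := by
  have h2 : front.reverse ++ back ≠ [] := by simp [hb]
  rw [PySem.List.pyGetD_neg_one _ _ h2, PySem.List.pyGetD_neg_one _ _ hb,
    List.getLast_append]
  simp [hb]



-- the two whole loops agree, step by step
lemma pvLoop_eq (byv : PySem.Dict Int (List (Int × Int))) (AP : List (Int × Int))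
    (hAP : AP.Pairwise pvLexLt)
    (hbyv : ∀ v, byv.getD v [] = AP.filter (pvContb v)) :
    ∀ (f : Nat) (front back : List Int) (rem : PySem.Set (Int × Int))
      (pos : PySem.Dict Int Int) (lp : Int),
      front ≠ [] → back ≠ [] → rem.Sublist AP →
      (∀ v, ∃ m : Nat, pos.getD v 0 = (m : Int) ∧ m ≤ (byv.getD v []).length ∧
        ∀ k, k < m → (hk : k < (byv.getD v []).length) →
          PySem.Set.contains rem (byv.getD v [])[k] = false) →
      (∃ mlp : Nat, lp = (mlp : Int) ∧ mlp < AP.length ∧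
        ∀ k, mlp < k → (hk : k < AP.length) → PySem.Set.contains rem AP[k] = false) →
      pvWhileA f (front.reverse ++ back) (List.map pvToL rem) =
        (pvLoopB byv AP f front back rem pos lp).1.reverse ++
        (pvLoopB byv AP f front back rem pos lp).2 := by
  intro f
  induction f with
  | zero => intro front back rem pos lp _ _ _ _ _; rw [pvWhileA, pvLoopB]
  | succ f ih =>
    intro front back rem pos lp hf hb hsub hpos hlp
    by_cases hrem : rem = []
    · subst hrem
      rw [pvWhileA, pvLoopB]
      simp
    · have hsr : rem.Pairwise pvLexLt := List.Pairwise.sublist hsub hAP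
      have hnd : rem.Nodup := pvNodup_of_pairwise hsr
      have hplne : List.map pvToL rem ≠ [] := by simpa using hrem
      obtain ⟨mlp, hlpe, hmlp, hlpdead⟩ := hlp
      -- A side: one pass of the while loop = the scan characterization
      rw [pvWhileA, if_neg hplne]
      have hscan := pvScanA_spec (front.reverse ++ back) rem [] rem (by simp) hrem hsr
        (by intro q hq; simp at hq)
      rw [pvHead_eq front back hf, pvTail_eq front back hb] at hscan
      -- B side: one pass of the loop
      rw [pvLoopB, if_neg hrem, hlpe]
      -- name the head and tail values
      set hh := PySem.List.pyGetD front (-1) 0 with hhdef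
      set tt := PySem.List.pyGetD back (-1) 0 with httdef
      -- the h-cursor advance
      obtain ⟨m0h, hm0h, hm0hlen, hdeadh⟩ := hpos hh
      obtain ⟨m1, e1, hm1ge, hm1len, hdead1, halive1⟩ :=
        pvAdvance_spec (byv.getD hh []) rem ((byv.getD hh []).length + 1) m0h hm0hlen (by omega)
      have hdeadAll1 : ∀ k, k < m1 → (hk : k < (byv.getD hh []).length) →
          PySem.Set.contains rem (byv.getD hh [])[k] = false := by
        intro k hk1 hk2
        rcases Nat.lt_or_ge k m0h with hk3 | hk3
        · exact hdeadh k hk3 hk2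
        · exact hdead1 k hk3 hk1 hk2
      -- the t-cursor advance (reads the already-updated position when tt = hh)
      have hpos1 : ∃ m0t : Nat, (pos.insert hh (m1 : Int)).getD tt 0 = (m0t : Int) ∧
          m0t ≤ (byv.getD tt []).length ∧
          ∀ k, k < m0t → (hk : k < (byv.getD tt []).length) →
            PySem.Set.contains rem (byv.getD tt [])[k] = false := by
        rw [PySem.Dict.getD_insert]
        by_cases hth : tt = hh
        · rw [if_pos hth, hth]
          exact ⟨m1, rfl, hm1len, hdeadAll1⟩
        · rw [if_neg hth]
          exact hpos tt
      obtain ⟨m0t, hm0t, hm0tlen, hdeadt⟩ := hpos1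
      obtain ⟨m2, e2, hm2ge, hm2len, hdead2, halive2⟩ :=
        pvAdvance_spec (byv.getD tt []) rem ((byv.getD tt []).length + 1) m0t hm0tlen (by omega)
      have hdeadAll2 : ∀ k, k < m2 → (hk : k < (byv.getD tt []).length) →
          PySem.Set.contains rem (byv.getD tt [])[k] = false := by
        intro k hk1 hk2
        rcases Nat.lt_or_ge k m0t with hk3 | hk3
        · exact hdeadt k hk3 hk2
        · exact hdead2 k hk3 hk1 hk2
      -- the two candidate options are the find?s over the endpoint indexes
      have hph : (if (m1 : Int) < ((byv.getD hh []).length : Int)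
            then some (PySem.List.pyGetD (byv.getD hh []) (m1 : Int) (0, 0)) else none)
          = (byv.getD hh []).find? (fun q => PySem.Set.contains rem q) := by
        rcases Nat.lt_or_ge m1 (byv.getD hh []).length with hlt | hge
        · rw [if_pos (by exact_mod_cast hlt)]
          rw [PySem.List.pyGetD_eq_getElem _ _ (by omega) (by exact_mod_cast hlt)]
          rw [pvFind_cut _ _ m1 hlt (fun k hk hkm => hdeadAll1 k hkm hk) (halive1 hlt)]
          simp
        · rw [if_neg (by push_cast; omega)]
          rw [pvFind_cut_none _ _ (fun k hk => hdeadAll1 k (by omega) hk)]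

      have hpt : (if (m2 : Int) < ((byv.getD tt []).length : Int)
            then some (PySem.List.pyGetD (byv.getD tt []) (m2 : Int) (0, 0)) else none)
          = (byv.getD tt []).find? (fun q => PySem.Set.contains rem q) := by
        rcases Nat.lt_or_ge m2 (byv.getD tt []).length with hlt | hge
        · rw [if_pos (by exact_mod_cast hlt)]
          rw [PySem.List.pyGetD_eq_getElem _ _ (by omega) (by exact_mod_cast hlt)]
          rw [pvFind_cut _ _ m2 hlt (fun k hk hkm => hdeadAll2 k hkm hk) (halive2 hlt)]
          simp
        · rw [if_neg (by push_cast; omega)]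
          rw [pvFind_cut_none _ _ (fun k hk => hdeadAll2 k (by omega) hk)]
      -- substitute everything computed so far into the loop body
      simp only [hm0h, e1, hm0t, e2, hph, hpt, pvDiscard_eq_erase hnd]
      have hsel := pvSelect hAP hsub hh tt
      rw [← hbyv hh, ← hbyv tt] at hsel
      rw [← hsel]
      -- invariants that survive one removal (for any removed pair)
      have hposNew : ∀ (c : Int × Int) (v : Int), ∃ m : Nat,
          ((pos.insert hh (m1 : Int)).insert tt (m2 : Int)).getD v 0 = (m : Int) ∧
          m ≤ (byv.getD v []).length ∧
          ∀ k, k < m → (hk : k < (byv.getD v []).length) →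
            PySem.Set.contains (rem.erase c) (byv.getD v [])[k] = false := by
        intro c v
        rw [PySem.Dict.getD_insert]
        by_cases hvt : v = tt
        · rw [if_pos hvt, hvt]
          exact ⟨m2, rfl, hm2len, fun k hk1 hk2 =>
            pvContains_erase_false (hdeadAll2 k hk1 hk2)⟩
        · rw [if_neg hvt, PySem.Dict.getD_insert]
          by_cases hvh : v = hh
          · rw [if_pos hvh, hvh]
            exact ⟨m1, rfl, hm1len, fun k hk1 hk2 =>
              pvContains_erase_false (hdeadAll1 k hk1 hk2)⟩
          · rw [if_neg hvh]
            obtain ⟨m, hm, hml, hmd⟩ := hpos v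
            exact ⟨m, hm, hml, fun k hk1 hk2 =>
              pvContains_erase_false (hmd k hk1 hk2)⟩
      have hsubE : ∀ (c : Int × Int), (rem.erase c).Sublist AP :=
        fun c => List.Sublist.trans List.erase_sublist hsub
      rcases hfind : rem.find? (pvMatch hh tt) with _ | c
      · -- no remaining pair touches either end: both take the largest remaining pair
        rw [hfind] at hscan
        have hexj : ∃ j : Nat, ∃ hj : j < AP.length, j ≤ mlp ∧
            PySem.Set.contains rem AP[j] = true := by
          rcases List.exists_mem_of_ne_nil rem hrem with ⟨q, hq⟩
          rcases List.mem_iff_getElem.mp (hsub.subset hq) with ⟨j, hj, hje⟩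
          refine ⟨j, hj, ?_, by rw [hje]; exact pvContains_iff.mpr hq⟩
          by_contra hgt
          have := hlpdead j (by omega) hj
          rw [hje, pvContains_iff.mpr hq] at this
          exact absurd this (by simp)
        obtain ⟨m', e3, hm'le, hm'lt, halive', hdead'⟩ :=
          pvAdvBack_spec AP rem (AP.length + 1) mlp hmlp (by omega) hexj
        rw [e3]
        have hgetp : PySem.List.pyGetD AP (m' : Int) (0, 0) = AP[m'] := by
          rw [PySem.List.pyGetD_eq_getElem _ _ (by omega) (by exact_mod_cast hm'lt)]
          simp
        have hdeadAfter : ∀ k, m' < k → (hk : k < AP.length) → AP[k] ∉ rem := by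
          intro k hk1 hk2
          intro hmem
          rcases Nat.lt_or_ge mlp k with hk3 | hk3
          · have := hlpdead k hk3 hk2
            rw [pvContains_iff.mpr hmem] at this
            exact absurd this (by simp)
          · have := hdead' k hk1 (by omega) hk2
            rw [pvContains_iff.mpr hmem] at this
            exact absurd this (by simp)
        have hlastAP : rem.getLastD (0,0) = AP[m'] :=
          pvMax_eq_getLast hAP hsub hrem m' hm'lt (pvContains_iff.mp halive') hdeadAfter
        rw [hlastAP] at hscan
        simp only [hscan, hgetp]
        have hsig : (front.reverse ++ back) ++ [(AP[m']).1, (AP[m']).2]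
            = front.reverse ++ (back ++ [(AP[m']).1, (AP[m']).2]) := by
          rw [List.append_assoc]
        rw [hsig]
        exact ih front (back ++ [(AP[m']).1, (AP[m']).2]) (rem.erase AP[m'])
          ((pos.insert hh (m1 : Int)).insert tt (m2 : Int)) (m' : Int)
          hf (by simp) (hsubE _) (hposNew _)
          ⟨m', rfl, hm'lt, fun k hk1 hk2 =>
            pvContains_erase_false (by
              rcases hc : PySem.Set.contains rem (AP[k]'hk2) with _ | _
              · rfl
              · exact absurd (pvContains_iff.mp hc) (hdeadAfter k hk1 hk2))⟩
      · -- a matching pair exists: both attach the first (lexicographically least) one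
        rw [hfind] at hscan
        have hcmem : c ∈ rem := List.mem_of_find?_eq_some hfind
        simp only [hscan, pvAttach]
        by_cases hc1 : c.1 = hh
        · rw [if_pos hc1, if_pos hc1]
          have hsig : c.2 :: (front.reverse ++ back) = (front ++ [c.2]).reverse ++ back := by
            simp
          rw [hsig]
          exact ih (front ++ [c.2]) back (rem.erase c)
            ((pos.insert hh (m1 : Int)).insert tt (m2 : Int)) (mlp : Int)
            (by simp) hb (hsubE _) (hposNew _)
            ⟨mlp, rfl, hmlp, fun k hk1 hk2 => pvContains_erase_false (hlpdead k hk1 hk2)⟩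
        · rw [if_neg hc1, if_neg hc1]
          by_cases hc2 : c.2 = hh
          · rw [if_pos hc2, if_pos hc2]
            have hsig : c.1 :: (front.reverse ++ back) = (front ++ [c.1]).reverse ++ back := by
              simp
            rw [hsig]
            exact ih (front ++ [c.1]) back (rem.erase c)
              ((pos.insert hh (m1 : Int)).insert tt (m2 : Int)) (mlp : Int)
              (by simp) hb (hsubE _) (hposNew _)
              ⟨mlp, rfl, hmlp, fun k hk1 hk2 => pvContains_erase_false (hlpdead k hk1 hk2)⟩
          · rw [if_neg hc2, if_neg hc2]
            by_cases hc3 : c.1 = tt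
            · rw [if_pos hc3, if_pos hc3]
              have hsig : (front.reverse ++ back) ++ [c.2] = front.reverse ++ (back ++ [c.2]) := by
                rw [List.append_assoc]
              rw [hsig]
              exact ih front (back ++ [c.2]) (rem.erase c)
                ((pos.insert hh (m1 : Int)).insert tt (m2 : Int)) (mlp : Int)
                hf (by simp) (hsubE _) (hposNew _)
                ⟨mlp, rfl, hmlp, fun k hk1 hk2 => pvContains_erase_false (hlpdead k hk1 hk2)⟩
            · rw [if_neg hc3, if_neg hc3]
              have hsig : (front.reverse ++ back) ++ [c.1] = front.reverse ++ (back ++ [c.1]) := by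
                rw [List.append_assoc]
              rw [hsig]
              exact ih front (back ++ [c.1]) (rem.erase c)
                ((pos.insert hh (m1 : Int)).insert tt (m2 : Int)) (mlp : Int)
                hf (by simp) (hsubE _) (hposNew _)
                ⟨mlp, rfl, hmlp, fun k hk1 hk2 => pvContains_erase_false (hlpdead k hk1 hk2)⟩

-- ===== VERDICT (by name: the statement is the Claim_ definition above) =====
theorem make_SI_spec : Claim_equal_make_SI := by
  intro raw_sig _ hpre
  unfold Spec_make_SI
  have hpre2 : 2 ≤ raw_sig.length := hpre
  simp only [make_SI, make_SI_alt]
  have hap : (PySem.List.pyRange 1 (raw_sig.length : Int)).foldl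
      (fun acc i => acc ++ (PySem.List.pyRange (i + 1) ((raw_sig.length : Int) + 1)).map
        (fun j => (i, j))) [] = pvAPn (raw_sig.length : Int) := rfl
  rw [hap, pvPairList_eq (raw_sig.length : Int)]
  have hAP := pvAPn_sorted (raw_sig.length : Int)
  have hAPne : pvAPn (raw_sig.length : Int) ≠ [] := by
    have hmem : ((1 : Int), (2 : Int)) ∈ pvAPn (raw_sig.length : Int) := by
      rw [pvAPn_eq]
      apply List.mem_flatMap.mpr
      have h1 : (1 : Int) ∈ PySem.List.pyRange 1 (raw_sig.length : Int) := by
        rw [PySem.List.mem_pyRange_one]; omega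
      have h2 : (2 : Int) ∈ PySem.List.pyRange (1 + 1) ((raw_sig.length : Int) + 1) := by
        rw [PySem.List.mem_pyRange_one]; omega
      exact ⟨1, h1, List.mem_map.mpr ⟨2, h2, rfl⟩⟩
    intro he
    rw [he] at hmem
    exact absurd hmem (by simp)
  cases hAPe : pvAPn (raw_sig.length : Int) with
  | nil => exact absurd hAPe hAPne
  | cons first rest =>
    have hbyv : ∀ v, ((first :: rest).foldl
        (fun d p => (PySem.Dict.modify d p.1 [] (· ++ [p])).modify p.2 [] (· ++ [p]))
        ((PySem.List.pyRange 1 ((raw_sig.length : Int) + 1)).foldl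
          (fun d v => d.insert v []) PySem.Dict.empty)).getD v []
        = (first :: rest).filter (pvContb v) := by
      intro v
      rw [pvByv_getD (first :: rest) _ v (by
        intro p hp
        have := pvAPn_bounds (raw_sig.length : Int) p (by rw [hAPe]; exact hp)
        omega)]
      rw [pvGetD_fold_insert_nil _ PySem.Dict.empty (fun w => by simp [PySem.Dict.getD_empty]) v]
      rfl
    have hpos0 : ∀ v, ((PySem.List.pyRange 1 ((raw_sig.length : Int) + 1)).foldl
        (fun d v => d.insert v 0) PySem.Dict.empty).getD v 0 = ((0 : Nat) : Int) := by
      intro v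
      rw [pvGetD_fold_insert_zero _ PySem.Dict.empty (fun w => by simp [PySem.Dict.getD_empty]) v]
      rfl
    have hrsub : rest.Sublist (first :: rest) := List.sublist_cons_self first rest
    have hrnd : rest.Nodup :=
      pvNodup_of_pairwise (List.Pairwise.sublist hrsub (hAPe ▸ hAP))
    have hslice : PySem.Set.ofList (PySem.List.slice (first :: rest) (some 1) none) = rest := by
      rw [PySem.List.slice_from _ (by norm_num)]
      simp only [Int.toNat_one, List.drop_one, List.tail_cons]
      exact PySem.Set.ofList_eq_self_of_nodup rest hrnd
    rw [hslice]
    have hlen : ((first :: rest).length : Int) - 1 = ((rest.length : Nat) : Int) := by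
      simp
    rw [hlen]
    have hloop := pvLoop_eq _ (first :: rest) (hAPe ▸ hAP) hbyv rest.length
      [first.1] [first.2] rest
      ((PySem.List.pyRange 1 ((raw_sig.length : Int) + 1)).foldl
        (fun d v => d.insert v 0) PySem.Dict.empty)
      ((rest.length : Nat) : Int)
      (by simp) (by simp) hrsub
      (fun v => ⟨0, hpos0 v, Nat.zero_le _, fun k hk _ => by omega⟩)
      ⟨rest.length, rfl, by simp, fun k hk1 hk2 => by simp at hk2; omega⟩
    have hsig0 : ([first.1] : List Int).reverse ++ [first.2] = pvToL first := rfl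
    rw [hsig0] at hloop
    have hfuel : (List.map pvToL rest).length = rest.length := by simp
    simp only [List.map_cons]
    rw [hfuel, hloop]
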